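-- pv_equiv track=rewrite | github.com/n0had/mmsegmentation_4TopFormer_continue | demo/image_demo_directModel1.py | get_palette_cloths
-- ===== SOURCE A (Python) =====
-- def get_palette_cloths(num_cls):
--     """ Returns the color map for visualizing the segmentation mask.
--     Args:
--         num_cls: Number of classes
--     Returns:
--         The color map
--     """
--     n = num_cls
--     palette = [0] * (n * 3)
--     for j in range(0, n):
--         lab = j
--         palette[j * 3 + 0] = 0
--         palette[j * 3 + 1] = 0
--         palette[j * 3 + 2] = 0
--         i = 0
--         while lab:
--             palette[j * 3 + 0] |= (((lab >> 0) & 1) << (7 - i))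
--             palette[j * 3 + 1] |= (((lab >> 1) & 1) << (7 - i))
--             palette[j * 3 + 2] |= (((lab >> 2) & 1) << (7 - i))
--             i += 1
--             lab >>= 3
--     return palette
-- ===== SOURCE B (Python) =====
-- def get_palette_cloths(num_cls):
--     """ Returns the color map for visualizing the segmentation mask.
--     Args:
--         num_cls: Number of classes
--     Returns:
--         The color map
--     """
--     n = num_cls
--     palette = [0] * (n * 3)
--     for j in range(0, n):
--         # the color of class j is the color of class j >> 3, shifted right
--         # one bit, with bits 0..2 of j OR-ed in as the new top bits
--         p = (j >> 3) * 3
--         palette[j * 3 + 0] = (((j >> 0) & 1) << 7) | (palette[p + 0] >> 1)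
--         palette[j * 3 + 1] = (((j >> 1) & 1) << 7) | (palette[p + 1] >> 1)
--         palette[j * 3 + 2] = (((j >> 2) & 1) << 7) | (palette[p + 2] >> 1)
--     return palette
-- ===== Notes on version B (the rewrite author's own statement) =====
-- stated objective: faster
-- what changed: Replaces the per-class inner while-loop over the base-8 digits of j by a single O(1) recurrence per channel that shifts the already-computed color of class j>>3 right by one bit and ORs in the new top bit.
import Mathlib
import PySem

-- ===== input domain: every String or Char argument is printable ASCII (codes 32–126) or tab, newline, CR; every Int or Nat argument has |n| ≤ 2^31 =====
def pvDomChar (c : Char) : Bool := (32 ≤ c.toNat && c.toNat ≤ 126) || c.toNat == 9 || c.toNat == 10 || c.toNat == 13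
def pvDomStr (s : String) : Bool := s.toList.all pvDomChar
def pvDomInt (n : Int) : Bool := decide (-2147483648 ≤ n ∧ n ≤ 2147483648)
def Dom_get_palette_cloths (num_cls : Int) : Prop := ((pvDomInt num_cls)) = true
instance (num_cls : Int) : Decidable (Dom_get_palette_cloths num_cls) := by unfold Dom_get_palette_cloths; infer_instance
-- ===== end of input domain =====

-- B replaces A's per-class while-loop over the base-8 digits of j by an O(1)
-- recurrence reading the already-computed color of class j >> 3 (objective: faster).

-- ===== PORT A =====
-- 'palette[k] |= v' for a nonnegative Python int v (index always in range when used)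
def pvSetOr (pal : List Int) (k : Nat) (v : Nat) : List Int :=
  pal.set k (PySem.Int.bor (pal.getD k 0) ↑v)

-- the while-loop 'while lab: palette[j*3+c] |= ((lab >> c) & 1) << (7 - i); i += 1; lab >>= 3'.
-- lab = j ≥ 0 (j comes from range(0, n)) so it is tracked as a Nat; Nat's >>> &&& <<< match
-- Python's on nonnegative ints.  '<<< (7 - i)' uses truncated subtraction, which is exact
-- because under Pre_ (num_cls ≤ 2^24) the loop runs at most 8 times so i ≤ 7 whenever lab ≠ 0
-- (for i > 7 Python raises ValueError; exactly those inputs are excluded by Pre_).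
def pvAWhile (pal : List Int) (j3 : Nat) (lab : Nat) (i : Nat) : List Int :=
  if lab = 0 then pal
  else
    pvAWhile
      (pvSetOr (pvSetOr (pvSetOr pal (j3 + 0) (((lab >>> 0) &&& 1) <<< (7 - i)))
          (j3 + 1) (((lab >>> 1) &&& 1) <<< (7 - i)))
          (j3 + 2) (((lab >>> 2) &&& 1) <<< (7 - i)))
      j3 (lab >>> 3) (i + 1)
termination_by lab
decreasing_by
  simp only [Nat.shiftRight_eq_div_pow]
  exact Nat.div_lt_self (Nat.pos_of_ne_zero (by assumption)) (by norm_num)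

-- body of 'for j in range(0, n)': zero the three channels, then the while-loop
def pvStepA (pal : List Int) (j : Int) : List Int :=
  pvAWhile (((pal.set (j.toNat * 3 + 0) 0).set (j.toNat * 3 + 1) 0).set (j.toNat * 3 + 2) 0)
    (j.toNat * 3) j.toNat 0

def get_palette_cloths (num_cls : Int) : List Int :=
  (PySem.List.pyRange 0 num_cls 1).foldl pvStepA (List.replicate (num_cls * 3).toNat (0 : Int))

-- ===== PORT B =====
-- body of B's loop: palette[j*3+c] = (((j >> c) & 1) << 7) | (palette[(j>>3)*3 + c] >> 1)
def pvStepB (pal : List Int) (j : Int) : List Int :=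
  let jn := j.toNat        -- j ≥ 0 in range(0, n)
  let p := (jn >>> 3) * 3
  let pal := pal.set (jn * 3 + 0) (PySem.Int.bor (↑(((jn >>> 0) &&& 1) <<< 7)) ((pal.getD (p + 0) 0) >>> 1))
  let pal := pal.set (jn * 3 + 1) (PySem.Int.bor (↑(((jn >>> 1) &&& 1) <<< 7)) ((pal.getD (p + 1) 0) >>> 1))
  let pal := pal.set (jn * 3 + 2) (PySem.Int.bor (↑(((jn >>> 2) &&& 1) <<< 7)) ((pal.getD (p + 2) 0) >>> 1))
  pal

def get_palette_cloths_alt (num_cls : Int) : List Int :=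
  (PySem.List.pyRange 0 num_cls 1).foldl pvStepB (List.replicate (num_cls * 3).toNat (0 : Int))

-- ===== PRECONDITION & SPEC =====
-- Pre_ excludes exactly the inputs num_cls > 2^24 on which A raises ValueError
-- ('negative shift count': a class index j ≥ 2^24 has more than 8 base-8 digits,
-- so the while-loop reaches i = 8 and shifts by 7 - 8 < 0).
def Pre_get_palette_cloths (num_cls : Int) : Prop := num_cls ≤ 16777216
instance (num_cls : Int) : Decidable (Pre_get_palette_cloths num_cls) := by unfold Pre_get_palette_cloths; infer_instance
def pvWitness_get_palette_cloths : Int := 9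

def Spec_get_palette_cloths (num_cls : Int) (out : List Int) : Prop := out = get_palette_cloths_alt num_cls
instance (num_cls : Int) (out : List Int) : Decidable (Spec_get_palette_cloths num_cls out) := by unfold Spec_get_palette_cloths; infer_instance

-- ===== CLAIM (what is proved, stated in full; the proofs are below) =====
def Claim_equal_get_palette_cloths : Prop := ∀ (num_cls : Int), Dom_get_palette_cloths num_cls → Pre_get_palette_cloths num_cls → Spec_get_palette_cloths num_cls (get_palette_cloths num_cls)

-- ===== LEMMAS AND PROOFS =====

-- the color of class j, channel c, as B's recurrence computes it
def pvColor (j : Nat) (c : Nat) : Nat :=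
  if j = 0 then 0
  else (((j >>> c) &&& 1) <<< 7) ||| ((pvColor (j >>> 3) c) >>> 1)
termination_by j
decreasing_by
  simp only [Nat.shiftRight_eq_div_pow]
  exact Nat.div_lt_self (Nat.pos_of_ne_zero (by assumption)) (by norm_num)

-- the value A's while-loop ORs into channel c, starting at bit position 7 - i
def pvW (lab i c : Nat) : Nat :=
  if lab = 0 then 0
  else (((lab >>> c) &&& 1) <<< (7 - i)) ||| pvW (lab >>> 3) (i + 1) c
termination_by lab
decreasing_by
  simp only [Nat.shiftRight_eq_div_pow]
  exact Nat.div_lt_self (Nat.pos_of_ne_zero (by assumption)) (by norm_num)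

theorem getD_set (l : List Int) (i k : Nat) (v : Int) :
    (l.set i v).getD k 0 = if i = k ∧ k < l.length then v else l.getD k 0 := by
  simp [List.getD, List.getElem?_set]
  split_ifs <;> simp_all

theorem length_pvSetOr (pal : List Int) (k : Nat) (v : Nat) :
    (pvSetOr pal k v).length = pal.length := by
  simp [pvSetOr]

theorem getD_pvSetOr (pal : List Int) (k k' : Nat) (v : Nat) :
    (pvSetOr pal k v).getD k' 0 =
      if k = k' ∧ k' < pal.length then PySem.Int.bor (pal.getD k 0) ↑v else pal.getD k' 0 := by
  rw [pvSetOr, getD_set]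

theorem pvAWhile_zero (pal : List Int) (j3 i : Nat) : pvAWhile pal j3 0 i = pal := by
  rw [pvAWhile]; simp

theorem pvW_zero (i c : Nat) : pvW 0 i c = 0 := by
  rw [pvW]; simp

theorem pvColor_zero (c : Nat) : pvColor 0 c = 0 := by
  rw [pvColor]; simp

theorem pvW_ne (lab i c : Nat) (h0 : lab ≠ 0) :
    pvW lab i c = (((lab >>> c) &&& 1) <<< (7 - i)) ||| pvW (lab >>> 3) (i + 1) c := by
  conv_lhs => rw [pvW]
  rw [if_neg h0]

theorem pvColor_ne (j c : Nat) (h0 : j ≠ 0) :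
    pvColor j c = (((j >>> c) &&& 1) <<< 7) ||| ((pvColor (j >>> 3) c) >>> 1) := by
  conv_lhs => rw [pvColor]
  rw [if_neg h0]

theorem pvAWhile_ne (pal : List Int) (j3 lab i : Nat) (h0 : lab ≠ 0) :
    pvAWhile pal j3 lab i =
      pvAWhile
        (pvSetOr (pvSetOr (pvSetOr pal (j3 + 0) (((lab >>> 0) &&& 1) <<< (7 - i)))
            (j3 + 1) (((lab >>> 1) &&& 1) <<< (7 - i)))
            (j3 + 2) (((lab >>> 2) &&& 1) <<< (7 - i)))
        j3 (lab >>> 3) (i + 1) := by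
  conv_lhs => rw [pvAWhile]
  rw [if_neg h0]

theorem shiftRight3_lt (lab : Nat) (h0 : lab ≠ 0) : lab >>> 3 < lab := by
  simp only [Nat.shiftRight_eq_div_pow]
  exact Nat.div_lt_self (Nat.pos_of_ne_zero h0) (by norm_num)

theorem pvW_shift : ∀ lab i c, lab < 8 ^ (7 - i) → pvW lab (i + 1) c = (pvW lab i c) >>> 1 := by
  intro lab
  induction lab using Nat.strong_induction_on with
  | _ lab IH =>
    intro i c h
    by_cases h0 : lab = 0
    · simp [h0, pvW_zero]
    · have hi : i ≤ 6 := by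
        by_contra hi
        have : 7 - i = 0 := by omega
        rw [this] at h; simp at h; omega
      have hb : lab >>> 3 < 8 ^ (7 - (i + 1)) := by
        simp only [Nat.shiftRight_eq_div_pow]
        have h8 : (8:Nat) ^ (7 - i) = 8 ^ (7 - (i+1)) * 8 := by
          rw [← pow_succ]; congr 1; omega
        rw [h8] at h
        exact Nat.div_lt_of_lt_mul (by omega)
      rw [pvW_ne lab (i+1) c h0, pvW_ne lab i c h0, Nat.shiftRight_or_distrib,
        IH _ (shiftRight3_lt lab h0) (i+1) c hb]
      congr 1
      have hs : 7 - i = (7 - (i + 1)) + 1 := by omega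
      rw [hs]
      simp only [Nat.shiftLeft_eq, Nat.shiftRight_succ, Nat.shiftRight_zero, pow_succ]
      rw [← Nat.mul_assoc, Nat.mul_div_cancel _ (by norm_num)]

theorem pvW_eq_color : ∀ j c, j < 8 ^ 8 → pvW j 0 c = pvColor j c := by
  intro j
  induction j using Nat.strong_induction_on with
  | _ j IH =>
    intro c hj
    by_cases h0 : j = 0
    · rw [h0, pvW_zero, pvColor_zero]
    · have hb : j >>> 3 < 8 ^ 7 := by
        simp only [Nat.shiftRight_eq_div_pow]
        have h8 : (8:Nat) ^ 8 = 8 ^ 7 * 8 := by rw [← pow_succ]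
        rw [h8] at hj
        exact Nat.div_lt_of_lt_mul (by omega)
      rw [pvW_ne j 0 c h0, pvColor_ne j c h0]
      have h1 : pvW (j >>> 3) (0 + 1) c = (pvW (j >>> 3) 0 c) >>> 1 :=
        pvW_shift (j >>> 3) 0 c (by simpa using hb)
      rw [show (0:Nat) + 1 = 1 from rfl] at h1
      rw [h1, IH _ (shiftRight3_lt j h0) c (lt_trans hb (by norm_num))]

theorem pvAWhile_getD (lab : Nat) : ∀ (pal : List Int) (j3 i : Nat) (m : Nat → Nat),
    j3 + 2 < pal.length →
    (∀ c, c < 3 → pal.getD (j3 + c) 0 = ↑(m c)) →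
    (pvAWhile pal j3 lab i).length = pal.length ∧
    (∀ c, c < 3 → (pvAWhile pal j3 lab i).getD (j3 + c) 0 = ↑(m c ||| pvW lab i c)) ∧
    (∀ k, k < j3 ∨ j3 + 2 < k → (pvAWhile pal j3 lab i).getD k 0 = pal.getD k 0) := by
  induction lab using Nat.strong_induction_on with
  | _ lab IH =>
    intro pal j3 i m hlen hm
    by_cases h0 : lab = 0
    · subst h0
      rw [pvAWhile_zero]
      refine ⟨rfl, fun c hc => ?_, fun k _ => rfl⟩
      rw [pvW_zero, Nat.or_zero]
      exact hm c hc
    · rw [pvAWhile_ne pal j3 lab i h0]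
      have hq : ∀ c, c < 3 →
          (pvSetOr (pvSetOr (pvSetOr pal (j3 + 0) (((lab >>> 0) &&& 1) <<< (7 - i)))
            (j3 + 1) (((lab >>> 1) &&& 1) <<< (7 - i)))
            (j3 + 2) (((lab >>> 2) &&& 1) <<< (7 - i))).getD (j3 + c) 0
          = ↑(m c ||| (((lab >>> c) &&& 1) <<< (7 - i))) := by
        intro c hc
        interval_cases c <;>
          (simp only [getD_pvSetOr, length_pvSetOr, true_and]
           split_ifs <;>
             first
               | omega
               | (rw [hm 0 (by norm_num)]; exact PySem.Int.bor_natCast _ _)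
               | (rw [hm 1 (by norm_num)]; exact PySem.Int.bor_natCast _ _)
               | (rw [hm 2 (by norm_num)]; exact PySem.Int.bor_natCast _ _))
      obtain ⟨hL, hC, hU⟩ := IH (lab >>> 3) (shiftRight3_lt lab h0)
        (pvSetOr (pvSetOr (pvSetOr pal (j3 + 0) (((lab >>> 0) &&& 1) <<< (7 - i)))
            (j3 + 1) (((lab >>> 1) &&& 1) <<< (7 - i)))
            (j3 + 2) (((lab >>> 2) &&& 1) <<< (7 - i)))
        j3 (i + 1) (fun c => m c ||| (((lab >>> c) &&& 1) <<< (7 - i)))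
        (by simp only [length_pvSetOr]; exact hlen) hq
      refine ⟨by rw [hL]; simp only [length_pvSetOr], fun c hc => ?_, fun k hk => ?_⟩
      · rw [hC c hc, pvW_ne lab i c h0, Nat.or_assoc]
      · rw [hU k hk]
        simp only [getD_pvSetOr, length_pvSetOr]
        split_ifs <;> first | rfl | omega

theorem pvStepA_getD (pal : List Int) (j : Nat) (h : j * 3 + 2 < pal.length) (hj : j < 8 ^ 8) :
    (pvStepA pal ↑j).length = pal.length ∧
    (∀ c, c < 3 → (pvStepA pal ↑j).getD (j * 3 + c) 0 = ↑(pvColor j c)) ∧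
    (∀ k, k < j * 3 ∨ j * 3 + 2 < k → (pvStepA pal ↑j).getD k 0 = pal.getD k 0) := by
  rw [pvStepA, Int.toNat_natCast]
  have hq : ∀ c, c < 3 →
      (((pal.set (j * 3 + 0) 0).set (j * 3 + 1) 0).set (j * 3 + 2) 0).getD (j * 3 + c) 0
        = ((0 : Nat) : Int) := by
    intro c hc
    interval_cases c <;>
      (simp only [getD_set, List.length_set, true_and]
       split_ifs <;> first | rfl | omega)
  obtain ⟨hL, hC, hU⟩ := pvAWhile_getD j
    (((pal.set (j * 3 + 0) 0).set (j * 3 + 1) 0).set (j * 3 + 2) 0)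
    (j * 3) 0 (fun _ => 0)
    (by simp only [List.length_set]; exact h) hq
  refine ⟨by rw [hL]; simp only [List.length_set], fun c hc => ?_, fun k hk => ?_⟩
  · rw [hC c hc, Nat.zero_or, pvW_eq_color j c hj]
  · rw [hU k hk]
    simp only [getD_set, List.length_set]
    split_ifs <;> first | rfl | omega

theorem natCast_shiftRight (x : Nat) : ((x : Int) >>> (1 : Int)) = ((x >>> 1 : Nat) : Int) := rfl

theorem pvColor_rec (j c : Nat) :
    pvColor j c = (((j >>> c) &&& 1) <<< 7) ||| ((pvColor (j >>> 3) c) >>> 1) := by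
  by_cases h0 : j = 0
  · subst h0
    simp [pvColor_zero]
  · exact pvColor_ne j c h0

theorem pvStepB_getD (pal : List Int) (j : Nat) (h : j * 3 + 2 < pal.length)
    (hpar : ∀ c, c < 3 → pal.getD ((j >>> 3) * 3 + c) 0 = ↑(pvColor (j >>> 3) c)) :
    (pvStepB pal ↑j).length = pal.length ∧
    (∀ c, c < 3 → (pvStepB pal ↑j).getD (j * 3 + c) 0 = ↑(pvColor j c)) ∧
    (∀ k, k < j * 3 ∨ j * 3 + 2 < k → (pvStepB pal ↑j).getD k 0 = pal.getD k 0) := by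
  have ha : j >>> 3 = j / 8 := by simp [Nat.shiftRight_eq_div_pow]
  simp only [pvStepB, Int.toNat_natCast]
  refine ⟨by simp only [List.length_set], fun c hc => ?_, fun k hk => ?_⟩
  · interval_cases c <;>
      (simp only [getD_set, List.length_set, true_and]
       split_ifs <;>
         first
           | omega
           | (rw [hpar 0 (by norm_num), natCast_shiftRight, PySem.Int.bor_natCast]
              exact congrArg _ (pvColor_rec j 0).symm)
           | (rw [hpar 1 (by norm_num), natCast_shiftRight, PySem.Int.bor_natCast]
              exact congrArg _ (pvColor_rec j 1).symm)
           | (rw [hpar 2 (by norm_num), natCast_shiftRight, PySem.Int.bor_natCast]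
              exact congrArg _ (pvColor_rec j 2).symm))
  · simp only [getD_set, List.length_set]
    split_ifs <;> first | rfl | omega

theorem getD_replicate (L k : Nat) : (List.replicate L (0 : Int)).getD k 0 = 0 := by
  simp [List.getD, List.getElem?_replicate]
  split_ifs <;> simp

theorem foldA_inv (L : Nat) : ∀ m : Nat, 3 * m ≤ L → m ≤ 8 ^ 8 →
    ((PySem.List.pyRange 0 (m : Int) 1).foldl pvStepA (List.replicate L (0:Int))).length = L ∧
    (∀ j c, j < m → c < 3 →
      ((PySem.List.pyRange 0 (m : Int) 1).foldl pvStepA (List.replicate L (0:Int))).getD (j * 3 + c) 0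
        = ↑(pvColor j c)) ∧
    (∀ k, 3 * m ≤ k →
      ((PySem.List.pyRange 0 (m : Int) 1).foldl pvStepA (List.replicate L (0:Int))).getD k 0 = 0) := by
  intro m
  induction m with
  | zero =>
    intro _ _
    rw [show ((0:Nat):Int) = 0 from rfl, PySem.List.pyRange_one_eq_nil le_rfl]
    exact ⟨by simp, fun j c hj _ => absurd hj (by omega), fun k _ => getD_replicate L k⟩
  | succ m IH =>
    intro h3 h8
    obtain ⟨h1, h2, hz⟩ := IH (by omega) (by omega)
    rw [show ((m + 1 : Nat) : Int) = (m : Int) + 1 by push_cast; ring,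
      PySem.List.pyRange_one_succ_right (by positivity), List.foldl_append]
    simp only [List.foldl_cons, List.foldl_nil]
    obtain ⟨sL, sC, sU⟩ := pvStepA_getD _ m (by rw [h1]; omega) (by omega)
    refine ⟨by rw [sL, h1], fun j c hj hc => ?_, fun k hk => ?_⟩
    · rcases Nat.lt_or_ge j m with hjm | hjm
      · rw [sU (j * 3 + c) (by omega)]
        exact h2 j c hjm hc
      · have : j = m := by omega
        subst this
        exact sC c hc
    · rw [sU k (by omega)]
      exact hz k (by omega)

theorem foldB_inv (L : Nat) : ∀ m : Nat, 3 * m ≤ L →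
    ((PySem.List.pyRange 0 (m : Int) 1).foldl pvStepB (List.replicate L (0:Int))).length = L ∧
    (∀ j c, j < m → c < 3 →
      ((PySem.List.pyRange 0 (m : Int) 1).foldl pvStepB (List.replicate L (0:Int))).getD (j * 3 + c) 0
        = ↑(pvColor j c)) ∧
    (∀ k, 3 * m ≤ k →
      ((PySem.List.pyRange 0 (m : Int) 1).foldl pvStepB (List.replicate L (0:Int))).getD k 0 = 0) := by
  intro m
  induction m with
  | zero =>
    intro _
    rw [show ((0:Nat):Int) = 0 from rfl, PySem.List.pyRange_one_eq_nil le_rfl]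
    exact ⟨by simp, fun j c hj _ => absurd hj (by omega), fun k _ => getD_replicate L k⟩
  | succ m IH =>
    intro h3
    obtain ⟨h1, h2, hz⟩ := IH (by omega)
    have ha : m >>> 3 = m / 8 := by simp [Nat.shiftRight_eq_div_pow]
    have hpar : ∀ c, c < 3 →
        ((PySem.List.pyRange 0 (m : Int) 1).foldl pvStepB (List.replicate L (0:Int))).getD
          ((m >>> 3) * 3 + c) 0 = ↑(pvColor (m >>> 3) c) := by
      intro c hc
      by_cases h0 : m = 0
      · subst h0
        rw [show (0:Nat) >>> 3 = 0 from rfl, pvColor_zero, Nat.cast_zero,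
          show 0 * 3 + c = c by omega]
        exact hz c (by omega)
      · exact h2 (m >>> 3) c (shiftRight3_lt m h0) hc
    rw [show ((m + 1 : Nat) : Int) = (m : Int) + 1 by push_cast; ring,
      PySem.List.pyRange_one_succ_right (by positivity), List.foldl_append]
    simp only [List.foldl_cons, List.foldl_nil]
    obtain ⟨sL, sC, sU⟩ := pvStepB_getD _ m (by rw [h1]; omega) hpar
    refine ⟨by rw [sL, h1], fun j c hj hc => ?_, fun k hk => ?_⟩
    · rcases Nat.lt_or_ge j m with hjm | hjm
      · rw [sU (j * 3 + c) (by omega)]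
        exact h2 j c hjm hc
      · have : j = m := by omega
        subst this
        exact sC c hc
    · rw [sU k (by omega)]
      exact hz k (by omega)

theorem get_palette_cloths_spec : Claim_equal_get_palette_cloths := by
  intro num_cls _ hpre
  unfold Spec_get_palette_cloths
  by_cases hneg : num_cls ≤ 0
  · rw [get_palette_cloths, get_palette_cloths_alt, PySem.List.pyRange_one_eq_nil hneg]
    rfl
  · have hN : num_cls = ((num_cls.toNat : Nat) : Int) := (Int.toNat_of_nonneg (by omega)).symm
    have hNle : num_cls.toNat ≤ 8 ^ 8 := by
      unfold Pre_get_palette_cloths at hpre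
      omega
    rw [get_palette_cloths, get_palette_cloths_alt, hN,
      show ((num_cls.toNat : Int) * 3).toNat = 3 * num_cls.toNat by omega]
    obtain ⟨aL, aC, aZ⟩ := foldA_inv (3 * num_cls.toNat) num_cls.toNat (by omega) hNle
    obtain ⟨bL, bC, bZ⟩ := foldB_inv (3 * num_cls.toNat) num_cls.toNat (by omega)
    apply List.ext_getElem (by rw [aL, bL])
    intro k hk1 hk2
    rw [← List.getD_eq_getElem _ 0 hk1, ← List.getD_eq_getElem _ 0 hk2]
    have hk : k < 3 * num_cls.toNat := by rw [aL] at hk1; exact hk1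
    have hdecomp : k = k / 3 * 3 + k % 3 := by omega
    rw [hdecomp, aC (k / 3) (k % 3) (by omega) (by omega),
      bC (k / 3) (k % 3) (by omega) (by omega)]
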